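-- pv_equiv track=rewrite | github.com/every-algorithm/python | graphics/hqx.py | hq2x
-- ===== SOURCE A (Python) =====
-- def hq2x(src):
--     """
--     src: list of lists of (R, G, B) tuples
--     returns: scaled list of lists of (R, G, B) tuples
--     """
--     height = len(src)
--     width = len(src[0]) if height > 0 else 0
--     dst_height = height * 2
--     dst_width = width * 2
--
--     # Initialize destination with zeros
--     dst = [[(0, 0, 0) for _ in range(dst_width)] for _ in range(dst_height)]
--
--     # Helper to get pixel with border replication
--     def get_pixel(x, y):
--         if x < 0:
--             x = 0
--         if x >= width:
--             x = width - 1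
--         if y < 0:
--             y = 0
--         if y >= height:
--             y = height - 1
--         return src[y][x]
--
--     for y in range(height):
--         for x in range(width):
--             # Get neighboring pixels
--             A = get_pixel(x - 1, y - 1)
--             B = get_pixel(x,     y - 1)
--             C = get_pixel(x + 1, y - 1)
--             D = get_pixel(x - 1, y)
--             E = get_pixel(x,     y)
--             F = get_pixel(x + 1, y)
--             G = get_pixel(x - 1, y + 1)
--             H = get_pixel(x,     y + 1)
--             I = get_pixel(x + 1, y + 1)
--
--             # Compute new pixels (simple weighted average)
--             # This simplified version just uses neighbor averages.
--             a = tuple((A[i] + B[i] + D[i] + E[i]) // 4 for i in range(3))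
--             b = tuple((B[i] + C[i] + E[i] + F[i]) // 4 for i in range(3))
--             c = tuple((D[i] + E[i] + G[i] + H[i]) // 4 for i in range(3))
--             d = tuple((E[i] + F[i] + H[i] + I[i]) // 4 for i in range(3))
--
--             # Map to destination coordinates
--             dst_x = x * 2
--             dst_y = y * 2
--
--             dst[dst_y][dst_x] = a
--             dst[dst_y][dst_x + 1] = b
--             dst[dst_y + 1][dst_x] = c
--             dst[dst_y + 1][dst_x + 1] = d
--
--     return dst
-- ===== SOURCE B (Python) =====
-- def hq2x(src):
--     """
--     src: list of lists of (R, G, B) tuples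
--     returns: scaled list of lists of (R, G, B) tuples
--     Destination-driven rewrite: one pass over the output grid, each pixel
--     computed directly as the floor-average of its 2x2 clamped source block.
--     """
--     height = len(src)
--     width = len(src[0]) if height > 0 else 0
--
--     def get_pixel(x, y):
--         if x < 0:
--             x = 0
--         if x >= width:
--             x = width - 1
--         if y < 0:
--             y = 0
--         if y >= height:
--             y = height - 1
--         return src[y][x]
--
--     def avg(p, q, r, s):
--         return tuple((p[i] + q[i] + r[i] + s[i]) // 4 for i in range(3))
--
--     out = []
--     for dst_y in range(height * 2):
--         y, sy = dst_y // 2, dst_y % 2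
--         row = []
--         for dst_x in range(width * 2):
--             x, sx = dst_x // 2, dst_x % 2
--             row.append(avg(get_pixel(x - 1 + sx, y - 1 + sy),
--                            get_pixel(x + sx,     y - 1 + sy),
--                            get_pixel(x - 1 + sx, y + sy),
--                            get_pixel(x + sx,     y + sy)))
--         out.append(row)
--     return out
-- ===== Notes on version B (the rewrite author's own statement) =====
-- stated objective: alternative
-- what changed: Replaced the mutate-in-place source-driven pass (pre-allocate a zero grid, write four pixels per source pixel) by a destination-driven pure pass that builds each output row directly, computing every output pixel as the floor-average of its clamped 2x2 source block from dst coordinates (y=dy//2, sy=dy%2).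
-- outside the precondition, e.g. on hq2x([[(1, 2, 3), (4, 5, 6)], [(7, 8, 9)]]): A raises IndexError, B raises IndexError
import Mathlib
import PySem

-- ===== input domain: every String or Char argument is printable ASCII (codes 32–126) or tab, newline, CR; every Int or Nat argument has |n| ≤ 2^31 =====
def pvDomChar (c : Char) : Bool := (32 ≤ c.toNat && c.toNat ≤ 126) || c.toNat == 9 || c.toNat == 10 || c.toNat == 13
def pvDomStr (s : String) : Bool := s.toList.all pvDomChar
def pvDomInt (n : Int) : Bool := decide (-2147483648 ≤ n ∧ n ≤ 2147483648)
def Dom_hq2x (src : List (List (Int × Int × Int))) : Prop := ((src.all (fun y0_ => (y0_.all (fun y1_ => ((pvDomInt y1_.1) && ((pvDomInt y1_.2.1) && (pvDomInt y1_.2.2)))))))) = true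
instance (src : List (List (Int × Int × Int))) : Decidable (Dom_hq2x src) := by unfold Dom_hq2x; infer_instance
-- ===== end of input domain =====

-- B rewrites A's mutate-in-place, source-driven pass (write 4 pixels per source pixel into a
-- pre-allocated zero grid) as a pure destination-driven pass building each output row directly:
-- same values, a genuinely different decomposition (objective: alternative).

-- ===== PORT A =====
-- get_pixel: clamp, then src[y][x]; the clamped indices are in range on Pre_, so getD is
-- exactly Python's list indexing there.
def getPixelA (src : List (List (Int × Int × Int))) (width height : Nat) (x y : Int) :
    Int × Int × Int :=
  let x := if x < 0 then 0 else x
  let x := if x ≥ (width : Int) then (width : Int) - 1 else x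
  let y := if y < 0 then 0 else y
  let y := if y ≥ (height : Int) then (height : Int) - 1 else y
  (src.getD y.toNat []).getD x.toNat (0, 0, 0)

-- tuple((P[i] + Q[i] + R[i] + S[i]) // 4 for i in range(3))
def avg4A (p q r s : Int × Int × Int) : Int × Int × Int :=
  (PySem.Int.floordiv (p.1 + q.1 + r.1 + s.1) 4,
   PySem.Int.floordiv (p.2.1 + q.2.1 + r.2.1 + s.2.1) 4,
   PySem.Int.floordiv (p.2.2 + q.2.2 + r.2.2 + s.2.2) 4)

-- body of A's inner loop: the four destination assignments for source pixel (x, y)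
def hq2xStep (src : List (List (Int × Int × Int))) (width height y : Nat)
    (dst : List (List (Int × Int × Int))) (x : Nat) : List (List (Int × Int × Int)) :=
  let pA := getPixelA src width height ((x : Int) - 1) ((y : Int) - 1)
  let pB := getPixelA src width height ((x : Int))     ((y : Int) - 1)
  let pC := getPixelA src width height ((x : Int) + 1) ((y : Int) - 1)
  let pD := getPixelA src width height ((x : Int) - 1) ((y : Int))
  let pE := getPixelA src width height ((x : Int))     ((y : Int))
  let pF := getPixelA src width height ((x : Int) + 1) ((y : Int))
  let pG := getPixelA src width height ((x : Int) - 1) ((y : Int) + 1)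
  let pH := getPixelA src width height ((x : Int))     ((y : Int) + 1)
  let pI := getPixelA src width height ((x : Int) + 1) ((y : Int) + 1)
  let a := avg4A pA pB pD pE
  let b := avg4A pB pC pE pF
  let c := avg4A pD pE pG pH
  let d := avg4A pE pF pH pI
  let dstX := x * 2
  let dstY := y * 2
  let dst := dst.modify dstY (fun row => row.set dstX a)
  let dst := dst.modify dstY (fun row => row.set (dstX + 1) b)
  let dst := dst.modify (dstY + 1) (fun row => row.set dstX c)
  let dst := dst.modify (dstY + 1) (fun row => row.set (dstX + 1) d)
  dst

def hq2x (src : List (List (Int × Int × Int))) : List (List (Int × Int × Int)) :=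
  let height := src.length
  let width := if 0 < height then (src.headD []).length else 0
  let dst := List.replicate (height * 2) (List.replicate (width * 2) ((0, 0, 0) : Int × Int × Int))
  (List.range height).foldl
    (fun dst y => (List.range width).foldl (hq2xStep src width height y) dst) dst

-- ===== PORT B =====
def getPixelB (src : List (List (Int × Int × Int))) (width height : Nat) (x y : Int) :
    Int × Int × Int :=
  let x := if x < 0 then 0 else x
  let x := if x ≥ (width : Int) then (width : Int) - 1 else x
  let y := if y < 0 then 0 else y
  let y := if y ≥ (height : Int) then (height : Int) - 1 else y
  (src.getD y.toNat []).getD x.toNat (0, 0, 0)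

def avg4B (p q r s : Int × Int × Int) : Int × Int × Int :=
  (PySem.Int.floordiv (p.1 + q.1 + r.1 + s.1) 4,
   PySem.Int.floordiv (p.2.1 + q.2.1 + r.2.1 + s.2.1) 4,
   PySem.Int.floordiv (p.2.2 + q.2.2 + r.2.2 + s.2.2) 4)

-- one destination pixel; dy // 2, dy % 2 on the nonnegative loop counters are Nat div/mod
def cellB (src : List (List (Int × Int × Int))) (width height dy dx : Nat) :
    Int × Int × Int :=
  let y := dy / 2
  let sy := dy % 2
  let x := dx / 2
  let sx := dx % 2
  avg4B (getPixelB src width height ((x : Int) - 1 + sx) ((y : Int) - 1 + sy))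
        (getPixelB src width height ((x : Int) + sx)     ((y : Int) - 1 + sy))
        (getPixelB src width height ((x : Int) - 1 + sx) ((y : Int) + sy))
        (getPixelB src width height ((x : Int) + sx)     ((y : Int) + sy))

def hq2x_alt (src : List (List (Int × Int × Int))) : List (List (Int × Int × Int)) :=
  let height := src.length
  let width := if 0 < height then (src.headD []).length else 0
  (List.range (height * 2)).map fun dy =>
    (List.range (width * 2)).map fun dx => cellB src width height dy dx

-- ===== PRECONDITION & SPEC =====
-- Pre_ excludes ragged inputs whose later rows are shorter than the first row: there Python A
-- (and Python B alike) raises IndexError inside get_pixel.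
def Pre_hq2x (src : List (List (Int × Int × Int))) : Prop :=
  ∀ r ∈ src, (src.headD []).length ≤ r.length
instance (src : List (List (Int × Int × Int))) : Decidable (Pre_hq2x src) := by
  unfold Pre_hq2x; infer_instance

def pvWitness_hq2x : (List (List (Int × Int × Int))) :=
  [[(1, 2, 3), (4, 5, 6)], [(7, 8, 9), (10, 11, 12)]]

def Spec_hq2x (src : List (List (Int × Int × Int))) (out : List (List (Int × Int × Int))) : Prop := out = hq2x_alt src
instance (src : List (List (Int × Int × Int))) (out : List (List (Int × Int × Int))) : Decidable (Spec_hq2x src out) := by unfold Spec_hq2x; infer_instance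

-- ===== CLAIM (what is proved, stated in full; the proofs are below) =====
def Claim_equal_hq2x : Prop := ∀ (src : List (List (Int × Int × Int))), Dom_hq2x src → Pre_hq2x src → Spec_hq2x src (hq2x src)

-- ===== LEMMAS AND PROOFS =====

-- the entry of the nested grid at row i, column k
def cellAt (dst : List (List (Int × Int × Int))) (i k : Nat) : Option (Int × Int × Int) :=
  dst[i]?.bind fun r => r[k]?

-- shape invariant of A's destination grid
def GoodGrid (height width : Nat) (dst : List (List (Int × Int × Int))) : Prop :=
  dst.length = height * 2 ∧ ∀ (i : Nat) (r : List (Int × Int × Int)), dst[i]? = some r → r.length = width * 2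

lemma goodGrid_modset (height width i c : Nat) (v : Int × Int × Int)
    (dst : List (List (Int × Int × Int))) (hG : GoodGrid height width dst) :
    GoodGrid height width (dst.modify i (fun row => row.set c v)) := by
  obtain ⟨hl, hr⟩ := hG
  refine ⟨by simpa using hl, ?_⟩
  intro j r hj
  rw [List.getElem?_modify] at hj
  cases hsome : dst[j]? with
  | none => simp [hsome] at hj
  | some r' =>
    simp only [hsome] at hj
    by_cases hij : i = j <;> simp [hij] at hj <;>
      simp [← hj, List.length_set, hr j r' hsome]

lemma cellAt_modset (height width i c : Nat) (v : Int × Int × Int)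
    (dst : List (List (Int × Int × Int))) (hG : GoodGrid height width dst)
    (hi : i < height * 2) (hc : c < width * 2) (j k : Nat) :
    cellAt (dst.modify i (fun row => row.set c v)) j k =
      if j = i ∧ k = c then some v else cellAt dst j k := by
  obtain ⟨hl, hr⟩ := hG
  unfold cellAt
  rw [List.getElem?_modify]
  by_cases hij : i = j
  · subst hij
    have hlt : i < dst.length := by omega
    have hsome : dst[i]? = some dst[i] := List.getElem?_eq_getElem hlt
    rw [hsome]
    have hrl : (dst[i]).length = width * 2 := hr i _ hsome
    by_cases hkc : k = c
    · subst hkc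
      simp [List.getElem?_set_self (by omega : k < (dst[i]).length)]
    · simp [List.getElem?_set_ne (fun h => hkc h.symm), hkc]
  · have hji : ¬ j = i := fun h => hij h.symm
    simp [hij, hji]

lemma cellB_a (src : List (List (Int × Int × Int))) (width height y x : Nat) :
    cellB src width height (y * 2) (x * 2) =
      avg4A (getPixelA src width height ((x : Int) - 1) ((y : Int) - 1))
            (getPixelA src width height x ((y : Int) - 1))
            (getPixelA src width height ((x : Int) - 1) y)
            (getPixelA src width height x y) := by
  unfold cellB
  have h1 : y * 2 / 2 = y := by omega
  have h2 : y * 2 % 2 = 0 := by omega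
  have h3 : x * 2 / 2 = x := by omega
  have h4 : x * 2 % 2 = 0 := by omega
  rw [h1, h2, h3, h4]
  show avg4B (getPixelB src width height (↑x - 1 + ((0:Nat):Int)) (↑y - 1 + ((0:Nat):Int))) _ _ _ = _
  norm_num [avg4B, avg4A, getPixelB, getPixelA]

lemma cellB_b (src : List (List (Int × Int × Int))) (width height y x : Nat) :
    cellB src width height (y * 2) (x * 2 + 1) =
      avg4A (getPixelA src width height x ((y : Int) - 1))
            (getPixelA src width height ((x : Int) + 1) ((y : Int) - 1))
            (getPixelA src width height x y)
            (getPixelA src width height ((x : Int) + 1) y) := by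
  unfold cellB
  have h1 : y * 2 / 2 = y := by omega
  have h2 : y * 2 % 2 = 0 := by omega
  have h3 : (x * 2 + 1) / 2 = x := by omega
  have h4 : (x * 2 + 1) % 2 = 1 := by omega
  rw [h1, h2, h3, h4]
  norm_num [avg4B, avg4A, getPixelB, getPixelA]

lemma cellB_c (src : List (List (Int × Int × Int))) (width height y x : Nat) :
    cellB src width height (y * 2 + 1) (x * 2) =
      avg4A (getPixelA src width height ((x : Int) - 1) y)
            (getPixelA src width height x y)
            (getPixelA src width height ((x : Int) - 1) ((y : Int) + 1))
            (getPixelA src width height x ((y : Int) + 1)) := by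
  unfold cellB
  have h1 : (y * 2 + 1) / 2 = y := by omega
  have h2 : (y * 2 + 1) % 2 = 1 := by omega
  have h3 : x * 2 / 2 = x := by omega
  have h4 : x * 2 % 2 = 0 := by omega
  rw [h1, h2, h3, h4]
  norm_num [avg4B, avg4A, getPixelB, getPixelA]

lemma cellB_d (src : List (List (Int × Int × Int))) (width height y x : Nat) :
    cellB src width height (y * 2 + 1) (x * 2 + 1) =
      avg4A (getPixelA src width height x y)
            (getPixelA src width height ((x : Int) + 1) y)
            (getPixelA src width height x ((y : Int) + 1))
            (getPixelA src width height ((x : Int) + 1) ((y : Int) + 1)) := by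
  unfold cellB
  have h1 : (y * 2 + 1) / 2 = y := by omega
  have h2 : (y * 2 + 1) % 2 = 1 := by omega
  have h3 : (x * 2 + 1) / 2 = x := by omega
  have h4 : (x * 2 + 1) % 2 = 1 := by omega
  rw [h1, h2, h3, h4]
  norm_num [avg4B, avg4A, getPixelB, getPixelA]

lemma goodGrid_step (src : List (List (Int × Int × Int))) (width height y x : Nat)
    (dst : List (List (Int × Int × Int))) (hG : GoodGrid height width dst) :
    GoodGrid height width (hq2xStep src width height y dst x) := by
  unfold hq2xStep
  exact goodGrid_modset _ _ _ _ _ _ (goodGrid_modset _ _ _ _ _ _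
    (goodGrid_modset _ _ _ _ _ _ (goodGrid_modset _ _ _ _ _ _ hG)))

lemma hq2xStep_eq (src : List (List (Int × Int × Int))) (width height y x : Nat)
    (dst : List (List (Int × Int × Int))) :
    hq2xStep src width height y dst x =
      List.modify
        (List.modify
          (List.modify
            (List.modify dst (y * 2)
              (fun row => row.set (x * 2) (cellB src width height (y * 2) (x * 2))))
            (y * 2)
            (fun row => row.set (x * 2 + 1) (cellB src width height (y * 2) (x * 2 + 1))))
          (y * 2 + 1)
          (fun row => row.set (x * 2) (cellB src width height (y * 2 + 1) (x * 2))))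
        (y * 2 + 1)
        (fun row => row.set (x * 2 + 1) (cellB src width height (y * 2 + 1) (x * 2 + 1))) := by
  simp only [hq2xStep, cellB_a, cellB_b, cellB_c, cellB_d]

lemma cellAt_step (src : List (List (Int × Int × Int))) (width height y x : Nat)
    (dst : List (List (Int × Int × Int))) (hG : GoodGrid height width dst)
    (hy : y < height) (hx : x < width) (j k : Nat) :
    cellAt (hq2xStep src width height y dst x) j k =
      if (j = y * 2 ∨ j = y * 2 + 1) ∧ (k = x * 2 ∨ k = x * 2 + 1)
      then some (cellB src width height j k) else cellAt dst j k := by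
  have hG1 := goodGrid_modset height width (y * 2) (x * 2)
    (cellB src width height (y * 2) (x * 2)) dst hG
  have hG2 := goodGrid_modset height width (y * 2) (x * 2 + 1)
    (cellB src width height (y * 2) (x * 2 + 1)) _ hG1
  have hG3 := goodGrid_modset height width (y * 2 + 1) (x * 2)
    (cellB src width height (y * 2 + 1) (x * 2)) _ hG2
  rw [hq2xStep_eq,
      cellAt_modset height width _ _ _ _ hG3 (by omega) (by omega),
      cellAt_modset height width _ _ _ _ hG2 (by omega) (by omega),
      cellAt_modset height width _ _ _ _ hG1 (by omega) (by omega),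
      cellAt_modset height width _ _ _ _ hG (by omega) (by omega)]
  by_cases hj0 : j = y * 2 <;> by_cases hj1 : j = y * 2 + 1 <;>
    by_cases hk0 : k = x * 2 <;> by_cases hk1 : k = x * 2 + 1 <;>
    simp_all

lemma inner_inv (src : List (List (Int × Int × Int))) (width height y : Nat)
    (dst : List (List (Int × Int × Int))) (hG : GoodGrid height width dst)
    (hy : y < height) :
    ∀ j, j ≤ width →
      GoodGrid height width ((List.range j).foldl (hq2xStep src width height y) dst) ∧
      ∀ i k, cellAt ((List.range j).foldl (hq2xStep src width height y) dst) i k =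
        if (i = y * 2 ∨ i = y * 2 + 1) ∧ k < j * 2
        then some (cellB src width height i k) else cellAt dst i k := by
  intro j
  induction j with
  | zero => intro _; refine ⟨hG, fun i k => by simp⟩
  | succ n ih =>
    intro hle
    obtain ⟨ihG, ihc⟩ := ih (by omega)
    rw [List.range_succ, List.foldl_append, List.foldl_cons, List.foldl_nil]
    refine ⟨goodGrid_step _ _ _ _ _ _ ihG, ?_⟩
    intro i k
    rw [cellAt_step src width height y n _ ihG hy (by omega), ihc]
    by_cases hi : i = y * 2 ∨ i = y * 2 + 1
    · rcases Nat.lt_or_ge k (n * 2) with hk | hk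
      · rw [if_neg (by omega), if_pos ⟨hi, hk⟩, if_pos ⟨hi, by omega⟩]
      · by_cases hk2 : k = n * 2 ∨ k = n * 2 + 1
        · rw [if_pos ⟨hi, hk2⟩, if_pos ⟨hi, by omega⟩]
        · rw [if_neg (by omega), if_neg (by omega), if_neg (by omega)]
    · rw [if_neg (fun h => hi h.1), if_neg (fun h => hi h.1), if_neg (fun h => hi h.1)]

lemma outer_inv (src : List (List (Int × Int × Int))) (width height : Nat) :
    ∀ m, m ≤ height →
      GoodGrid height width ((List.range m).foldl
        (fun dst y => (List.range width).foldl (hq2xStep src width height y) dst)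
        (List.replicate (height * 2) (List.replicate (width * 2) ((0, 0, 0) : Int × Int × Int)))) ∧
      ∀ i k, cellAt ((List.range m).foldl
        (fun dst y => (List.range width).foldl (hq2xStep src width height y) dst)
        (List.replicate (height * 2) (List.replicate (width * 2) ((0, 0, 0) : Int × Int × Int)))) i k =
        if i < m * 2 ∧ k < width * 2
        then some (cellB src width height i k)
        else cellAt (List.replicate (height * 2) (List.replicate (width * 2) ((0, 0, 0) : Int × Int × Int))) i k := by
  intro m
  induction m with
  | zero =>
    intro _
    simp only [List.range_zero, List.foldl_nil]
    refine ⟨⟨by simp, fun i r h => ?_⟩, fun i k => by simp⟩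
    rw [List.getElem?_replicate] at h
    split at h
    · injection h with h; rw [← h]; simp
    · simp at h
  | succ n ih =>
    intro hle
    obtain ⟨ihG, ihc⟩ := ih (by omega)
    rw [List.range_succ, List.foldl_append, List.foldl_cons, List.foldl_nil]
    obtain ⟨jG, jc⟩ := inner_inv src width height n _ ihG (by omega) width (le_refl _)
    refine ⟨jG, ?_⟩
    intro i k
    rw [jc, ihc]
    by_cases hk : k < width * 2
    · by_cases hi : i < n * 2
      · rw [if_neg (by omega), if_pos ⟨hi, hk⟩, if_pos ⟨by omega, hk⟩]
      · by_cases hi2 : i = n * 2 ∨ i = n * 2 + 1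
        · rw [if_pos ⟨hi2, hk⟩, if_pos ⟨by omega, hk⟩]
        · rw [if_neg (by omega), if_neg (by omega), if_neg (by omega)]
    · rw [if_neg (by omega), if_neg (by omega), if_neg (by omega)]

lemma fold_eq_map (src : List (List (Int × Int × Int))) (width height : Nat) :
    (List.range height).foldl
      (fun dst y => (List.range width).foldl (hq2xStep src width height y) dst)
      (List.replicate (height * 2) (List.replicate (width * 2) ((0, 0, 0) : Int × Int × Int))) =
    (List.range (height * 2)).map (fun dy =>
      (List.range (width * 2)).map (fun dx => cellB src width height dy dx)) := by
  obtain ⟨⟨hlen, hrows⟩, hcell⟩ := outer_inv src width height height (le_refl _)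
  set R := (List.range height).foldl
    (fun dst y => (List.range width).foldl (hq2xStep src width height y) dst)
    (List.replicate (height * 2) (List.replicate (width * 2) ((0, 0, 0) : Int × Int × Int))) with hR
  apply List.ext_getElem?
  intro i
  by_cases hi : i < height * 2
  · have hsome : R[i]? = some R[i] := List.getElem?_eq_getElem (by omega)
    have hrl : (R[i]).length = width * 2 := hrows i _ hsome
    rw [hsome, List.getElem?_map, List.getElem?_range hi]
    simp only [Option.map_some]
    congr 1
    apply List.ext_getElem?
    intro k
    by_cases hk : k < width * 2
    · have := hcell i k
      rw [if_pos ⟨hi, hk⟩] at this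
      unfold cellAt at this
      rw [hsome] at this
      simp only [Option.bind_some] at this
      rw [this, List.getElem?_map, List.getElem?_range hk, Option.map_some]
    · rw [List.getElem?_eq_none (by omega),
          List.getElem?_eq_none (by simp [List.length_map, List.length_range]; omega)]
  · rw [List.getElem?_eq_none (by omega),
        List.getElem?_eq_none (by simp [List.length_map, List.length_range]; omega)]

-- ===== VERDICT (by name: the statement is the Claim_ definition above) =====
theorem hq2x_spec : Claim_equal_hq2x := by
  intro src _ _
  unfold Spec_hq2x hq2x hq2x_alt
  exact fold_eq_map src _ _
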